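-- pv_equiv track=rewrite | github.com/laujingxuan/leetcode | PYTHON/ReducingDishes.py | maxSatisfactionOkButCanBeImproved
-- ===== SOURCE A (Python) =====
-- def maxSatisfactionOkButCanBeImproved(satisfaction):
--     satisfaction.sort()
--     maxSatisfaction = satisfaction[-1]
--     # if all -ve value, then just return 0
--     if maxSatisfaction <= 0:
--         return 0
--
--     # find the totalPositive value
--     positiveSum = 0
--     for i in range(len(satisfaction)):
--         if satisfaction[i] > 0:
--             positiveSum += satisfaction[i]
--
--     # find the index where the sum of negative values start to > positive value
--     startIndex = len(satisfaction) - 2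
--     negativeSum = 0
--     for i in range(len(satisfaction) - 1, -1, -1):
--         if satisfaction[i] < 0:
--             negativeSum += satisfaction[i]
--             if -negativeSum >= positiveSum:
--                 break
--         startIndex = i
--
--     # find the total from the index
--     ans = 0
--     for i in range(startIndex, len(satisfaction)):
--         ans += satisfaction[i] * (i - startIndex + 1)
--
--     return ans
-- ===== SOURCE B (Python) =====
-- def maxSatisfactionOkButCanBeImproved(satisfaction):
--     satisfaction.sort()
--     total = 0
--     suffix = 0
--     for v in reversed(satisfaction):
--         suffix += v
--         if suffix <= 0:
--             break
--         total += suffix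
--     return total
-- ===== Notes on version B (the rewrite author's own statement) =====
-- stated objective: simpler
-- what changed: Replaces A's three passes over the sorted list (positive-sum scan, backward start-index search with separate negative accumulator, then a weighted re-summation) by a single reverse pass that keeps a running suffix sum and adds it into the total until it drops to zero or below.
import Mathlib
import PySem

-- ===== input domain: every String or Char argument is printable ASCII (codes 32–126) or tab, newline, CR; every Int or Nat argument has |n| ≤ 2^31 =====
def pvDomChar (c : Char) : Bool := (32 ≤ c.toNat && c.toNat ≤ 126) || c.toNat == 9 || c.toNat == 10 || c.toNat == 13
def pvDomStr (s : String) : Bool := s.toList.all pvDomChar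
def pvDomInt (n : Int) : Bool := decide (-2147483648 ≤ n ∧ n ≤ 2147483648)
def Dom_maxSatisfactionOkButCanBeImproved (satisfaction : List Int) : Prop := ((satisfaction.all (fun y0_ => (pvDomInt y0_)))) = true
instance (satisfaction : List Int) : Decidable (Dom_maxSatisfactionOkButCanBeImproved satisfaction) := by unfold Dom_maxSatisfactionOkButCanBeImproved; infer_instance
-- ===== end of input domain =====

-- B replaces A's three passes over the sorted list by a single reverse pass with a running
-- suffix sum (same return value; like A, B sorts its argument in place).

-- ===== PORT A =====
-- A's second loop (backward search for startIndex), with its break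
def pvA_startLoop (s : List Int) (idxs : List Int) (startIndex negSum posSum : Int) : Int :=
  match idxs with
  | [] => startIndex
  | i :: rest =>
    if PySem.List.pyGetD s i 0 < 0 then
      let ns := negSum + PySem.List.pyGetD s i 0
      if -ns ≥ posSum then startIndex
      else pvA_startLoop s rest i ns posSum
    else pvA_startLoop s rest i negSum posSum

def maxSatisfactionOkButCanBeImproved (satisfaction : List Int) : Int :=
  let s := PySem.List.sorted satisfaction (fun x => x) false
  match PySem.List.pyGet? s (-1) with
  | none => 0  -- IndexError on the empty list; excluded by Pre_
  | some maxSat =>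
    if maxSat ≤ 0 then 0
    else
      let positiveSum := (PySem.List.pyRange 0 s.length 1).foldl
        (fun acc i => if PySem.List.pyGetD s i 0 > 0 then acc + PySem.List.pyGetD s i 0 else acc) 0
      let startIndex := pvA_startLoop s
        (PySem.List.pyRange ((s.length : Int) - 1) (-1) (-1)) ((s.length : Int) - 2) 0 positiveSum
      (PySem.List.pyRange startIndex s.length 1).foldl
        (fun acc i => acc + PySem.List.pyGetD s i 0 * (i - startIndex + 1)) 0

-- ===== PORT B =====
-- B's single loop over reversed(sorted list): running suffix sum, break when it is ≤ 0
def pvB_loop : List Int → Int → Int → Int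
  | [], _, total => total
  | v :: rest, suffix, total =>
    if suffix + v ≤ 0 then total else pvB_loop rest (suffix + v) (total + (suffix + v))

def maxSatisfactionOkButCanBeImproved_alt (satisfaction : List Int) : Int :=
  pvB_loop (PySem.List.sorted satisfaction (fun x => x) false).reverse 0 0

-- ===== PRECONDITION & SPEC =====
-- Pre_ excludes only the empty list, on which A raises IndexError at satisfaction[-1].
def Pre_maxSatisfactionOkButCanBeImproved (satisfaction : List Int) : Prop := satisfaction ≠ []
instance (satisfaction : List Int) : Decidable (Pre_maxSatisfactionOkButCanBeImproved satisfaction) := by unfold Pre_maxSatisfactionOkButCanBeImproved; infer_instance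
def pvWitness_maxSatisfactionOkButCanBeImproved : List Int := [2, -1]

def Spec_maxSatisfactionOkButCanBeImproved (satisfaction : List Int) (out : Int) : Prop := out = maxSatisfactionOkButCanBeImproved_alt satisfaction
instance (satisfaction : List Int) (out : Int) : Decidable (Spec_maxSatisfactionOkButCanBeImproved satisfaction out) := by unfold Spec_maxSatisfactionOkButCanBeImproved; infer_instance

-- ===== CLAIM (what is proved, stated in full; the proofs are below) =====
def Claim_equal_maxSatisfactionOkButCanBeImproved : Prop := ∀ (satisfaction : List Int), Dom_maxSatisfactionOkButCanBeImproved satisfaction → Pre_maxSatisfactionOkButCanBeImproved satisfaction → Spec_maxSatisfactionOkButCanBeImproved satisfaction (maxSatisfactionOkButCanBeImproved satisfaction)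

-- ===== LEMMAS AND PROOFS =====

-- sum of the positive / negative elements of a list (proof-side abbreviations)
def pvPos (l : List Int) : Int := (l.filter (fun x => decide (0 < x))).sum
def pvNeg (l : List Int) : Int := (l.filter (fun x => decide (x < 0))).sum

-- number of elements B's loop consumes before breaking
def pvCnt : List Int → Int → Nat
  | [], _ => 0
  | v :: rest, s => if s + v ≤ 0 then 0 else pvCnt rest (s + v) + 1

-- prefix sum
def pvPs (r : List Int) (m : Nat) : Int := (r.take m).sum

lemma pvCnt_le_length (r : List Int) : ∀ s, pvCnt r s ≤ r.length := by
  induction r with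
  | nil => intro s; simp [pvCnt]
  | cons v rest ih =>
    intro s
    simp only [pvCnt, List.length_cons]
    split
    · omega
    · have := ih (s + v); omega

lemma pvSum_eq_pos_add_neg (l : List Int) : l.sum = pvPos l + pvNeg l := by
  induction l with
  | nil => simp [pvPos, pvNeg]
  | cons x xs ih =>
    simp only [pvPos, pvNeg, List.filter_cons, List.sum_cons] at *
    rcases lt_trichotomy x 0 with h | h | h
    · have h1 : ¬ (0 < x) := by omega
      simp [h, h1, ih]; ring
    · subst h; simp [ih]
    · have h1 : ¬ (x < 0) := by omega
      simp [h, h1, ih]; ring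

lemma pvPos_append (l₁ l₂ : List Int) : pvPos (l₁ ++ l₂) = pvPos l₁ + pvPos l₂ := by
  simp [pvPos, List.filter_append]

lemma pvNeg_append (l₁ l₂ : List Int) : pvNeg (l₁ ++ l₂) = pvNeg l₁ + pvNeg l₂ := by
  simp [pvNeg, List.filter_append]

lemma pvPos_of_neg (l : List Int) (h : ∀ x ∈ l, x < 0) : pvPos l = 0 := by
  have hf : l.filter (fun x => decide (0 < x)) = [] := by
    rw [List.filter_eq_nil_iff]; intro x hx; have := h x hx; simp; omega
  simp [pvPos, hf]

lemma pvPs_take_sum (r : List Int) : ∀ m, pvPs r m = ∑ p ∈ Finset.range m, r.getD p 0 := by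
  induction r with
  | nil => intro m; simp [pvPs]
  | cons x xs ih =>
    intro m
    cases m with
    | zero => simp [pvPs]
    | succ m =>
      rw [Finset.sum_range_succ']
      simp only [pvPs, List.take_succ_cons, List.sum_cons, List.getD_cons_succ, List.getD_cons_zero]
      rw [← ih m]; simp [pvPs]; ring

-- value of B's loop in closed form
lemma pvB_loop_val (r : List Int) : ∀ s t, pvB_loop r s t
    = t + ∑ m ∈ Finset.range (pvCnt r s), (s + pvPs r (m + 1)) := by
  induction r with
  | nil => intro s t; simp [pvB_loop, pvCnt]
  | cons v rest ih =>
    intro s t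
    by_cases h : s + v ≤ 0
    · simp [pvB_loop, pvCnt, h]
    · simp only [pvB_loop, pvCnt, h, if_false, ih]
      rw [Finset.sum_range_succ']
      simp only [pvPs, List.take_succ_cons, List.sum_cons]
      simp
      ring_nf

-- the double-sum identity: weighted sum = sum of prefix sums
lemma pvWeighted_eq_prefix (r : List Int) (k : Nat) :
    ∑ p ∈ Finset.range k, r.getD p 0 * ((k : Int) - (p : Int))
      = ∑ m ∈ Finset.range k, pvPs r (m + 1) := by
  induction k with
  | zero => simp
  | succ k ih =>
    rw [Finset.sum_range_succ (fun m => pvPs r (m+1)), ← ih, pvPs_take_sum]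
    rw [Finset.sum_range_succ]
    push_cast
    have hterm : ∀ p ∈ Finset.range k, r.getD p 0 * ((k:Int) + 1 - (p:Int)) = r.getD p 0 * ((k:Int) - p) + r.getD p 0 := by
      intro p _; ring
    rw [Finset.sum_congr rfl hterm, Finset.sum_add_distrib, Finset.sum_range_succ]
    ring

-- simulation of A's backward startIndex loop by pvCnt
lemma pvSim (posSum : Int) : ∀ (suf pre : List Int) (negSum : Int),
    (pre ++ suf).Pairwise (· ≥ ·) →
    pre ≠ [] →
    0 < (pre ++ suf).getD 0 0 →
    posSum = pvPos (pre ++ suf) →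
    negSum = pvNeg pre →
    pvA_startLoop (pre ++ suf).reverse
        (PySem.List.pyRange (((pre ++ suf).length : Int) - 1 - pre.length) (-1) (-1))
        (((pre ++ suf).length : Int) - pre.length) negSum posSum
      = ((pre ++ suf).length : Int) - (pre.length + pvCnt suf pre.sum) := by
  intro suf
  induction suf with
  | nil =>
    intro pre negSum _ _ _ _ _
    rw [PySem.List.pyRange_neg_one_eq_nil (by simp)]
    simp [pvA_startLoop, pvCnt]
  | cons v suf' ih =>
    intro pre negSum hpw hpre hhead hpos hneg
    obtain ⟨p0, pre', rfl⟩ := List.exists_cons_of_ne_nil hpre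
    set pre := p0 :: pre' with hpredef
    have hlen : ((pre ++ v :: suf').length : Int) = (pre.length : Int) + (suf'.length : Int) + 1 := by
      simp; ring
    -- the countdown range is nonempty
    rw [PySem.List.pyRange_neg_one_cons (by omega)]
    -- the element accessed first is v
    have hrev : (pre ++ v :: suf').reverse = suf'.reverse ++ ([v] ++ pre.reverse) := by
      simp
    have hidx : ((pre ++ v :: suf').length : Int) - 1 - (pre.length : Int) = ((suf'.length : Nat) : Int) := by
      omega
    have hget : PySem.List.pyGetD (pre ++ v :: suf').reverse
        (((pre ++ v :: suf').length : Int) - 1 - (pre.length : Int)) 0 = v := by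
      rw [hidx, PySem.List.pyGetD_natCast, hrev]
      simp [List.getD_eq_getElem?_getD]
    -- order facts
    rw [List.pairwise_append] at hpw
    obtain ⟨hpw1, hpw2, hge⟩ := hpw
    have hp0 : 0 < p0 := by simpa using hhead
    by_cases hv : v < 0
    · -- all of v :: suf' is negative, so posSum counts exactly pre's positives
      have hallneg : ∀ x ∈ v :: suf', x < 0 := by
        intro x hx
        rcases List.mem_cons.mp hx with rfl | hx
        · exact hv
        · have := (List.pairwise_cons.mp hpw2).1 x hx; omega
      have hsum : pre.sum = posSum + negSum := by
        rw [pvSum_eq_pos_add_neg pre, hpos, hneg, pvPos_append, pvPos_of_neg _ hallneg]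
        ring
      by_cases hbr : -(negSum + v) ≥ posSum
      · -- A breaks; B's count is 0
        have hc : pvCnt (v :: suf') pre.sum = 0 := by
          simp only [pvCnt]
          rw [if_pos (by omega)]
        simp only [pvA_startLoop, hget, if_pos hv]
        rw [if_pos hbr, hc]
        push_cast; ring
      · -- no break: recurse with pre ++ [v]
        have hc : pvCnt (v :: suf') pre.sum = pvCnt suf' (pre.sum + v) + 1 := by
          simp only [pvCnt]
          rw [if_neg (by omega)]
        simp only [pvA_startLoop, hget, if_pos hv]
        rw [if_neg hbr]
        have happ : (pre ++ [v]) ++ suf' = pre ++ v :: suf' := by simp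
        have := ih (pre ++ [v]) (negSum + v)
          (by rw [happ]; rw [List.pairwise_append]; exact ⟨hpw1, hpw2, hge⟩)
          (by simp)
          (by rw [happ]; simpa using hhead)
          (by rw [happ]; exact hpos)
          (by rw [pvNeg_append, ← hneg]; simp [pvNeg, hv])
        rw [happ] at this
        have hl2 : ((pre ++ [v]).length : Int) = (pre.length : Int) + 1 := by simp
        rw [hl2] at this
        have harg1 : ((pre ++ v :: suf').length : Int) - 1 - (pre.length : Int) - 1
            = ((pre ++ v :: suf').length : Int) - 1 - ((pre.length : Int) + 1) := by ring
        rw [harg1]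
        have harg2 : ((pre ++ v :: suf').length : Int) - 1 - (pre.length : Int)
            = ((pre ++ v :: suf').length : Int) - ((pre.length : Int) + 1) := by ring
        rw [harg2, this]
        rw [List.sum_append] at *
        simp only [List.sum_cons, List.sum_nil, add_zero] at *
        rw [hc]
        push_cast; ring
    · -- v ≥ 0: never breaks, pre.sum + v > 0
      have hprepos : ∀ x ∈ pre', 0 ≤ x := by
        intro x hx
        have := hge x (by simp [hpredef, hx]) v (by simp)
        omega
      have hps : 0 < pre.sum + v := by
        have h1 : 0 ≤ pre'.sum := List.sum_nonneg hprepos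
        simp only [hpredef, List.sum_cons]
        omega
      have hc : pvCnt (v :: suf') pre.sum = pvCnt suf' (pre.sum + v) + 1 := by
        simp only [pvCnt]
        rw [if_neg (by omega)]
      simp only [pvA_startLoop, hget, if_neg hv]
      have happ : (pre ++ [v]) ++ suf' = pre ++ v :: suf' := by simp
      have := ih (pre ++ [v]) negSum
        (by rw [happ]; rw [List.pairwise_append]; exact ⟨hpw1, hpw2, hge⟩)
        (by simp)
        (by rw [happ]; simpa using hhead)
        (by rw [happ]; exact hpos)
        (by rw [pvNeg_append, ← hneg]; simp [pvNeg, hv])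
      rw [happ] at this
      have hl2 : ((pre ++ [v]).length : Int) = (pre.length : Int) + 1 := by simp
      rw [hl2] at this
      have harg1 : ((pre ++ v :: suf').length : Int) - 1 - (pre.length : Int) - 1
          = ((pre ++ v :: suf').length : Int) - 1 - ((pre.length : Int) + 1) := by ring
      rw [harg1]
      have harg2 : ((pre ++ v :: suf').length : Int) - 1 - (pre.length : Int)
          = ((pre ++ v :: suf').length : Int) - ((pre.length : Int) + 1) := by ring
      rw [harg2, this]
      rw [List.sum_append] at *
      simp only [List.sum_cons, List.sum_nil, add_zero] at *
      rw [hc]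
      push_cast; ring

lemma pvSum_map_range_int (g : Nat → Int) (m : Nat) : ((List.range m).map g).sum = ∑ j ∈ Finset.range m, g j := rfl

-- value of A's final weighted-sum loop
lemma pvAnsFold (t : List Int) (k : Nat) (hk : k ≤ t.length) :
    (PySem.List.pyRange ((t.length : Int) - k) (t.length : Int) 1).foldl
        (fun acc i => acc + PySem.List.pyGetD t i 0 * (i - ((t.length : Int) - k) + 1)) 0
      = ∑ j ∈ Finset.range k, t.getD (t.length - k + j) 0 * ((j : Int) + 1) := by
  rw [PySem.List.pyRange_one, List.foldl_map, PySem.List.foldl_add]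
  have hto : ((t.length : Int) - ((t.length : Int) - k)).toNat = k := by omega
  rw [hto, zero_add, pvSum_map_range_int]
  apply Finset.sum_congr rfl
  intro j hj
  simp only [Finset.mem_range] at hj
  have ha : ((t.length : Int) - k) + (j : Int) = ((t.length - k + j : Nat) : Int) := by
    push_cast [hk]; ring
  rw [ha, PySem.List.pyGetD_natCast]
  congr 1
  push_cast [hk]
  ring

lemma pvPosFold : ∀ (l : List Int) (acc : Int),
    l.foldl (fun acc x => if x > 0 then acc + x else acc) acc = acc + pvPos l := by
  intro l
  induction l with
  | nil => intro acc; simp [pvPos]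
  | cons x xs ih =>
    intro acc
    simp only [List.foldl_cons, pvPos, List.filter_cons]
    by_cases h : 0 < x
    · simp only [gt_iff_lt, h, if_pos, decide_true, List.sum_cons, ih]
      simp [pvPos]; ring
    · simp only [gt_iff_lt, h, ih]
      simp [pvPos]

lemma pvGetD_reverse (t : List Int) (p : Nat) (hp : p < t.length) :
    t.reverse.getD p 0 = t.getD (t.length - 1 - p) 0 := by
  rw [List.getD_eq_getElem?_getD, List.getD_eq_getElem?_getD,
    List.getElem?_reverse hp, Nat.sub_sub]

lemma pvMain (satisfaction : List Int) (hpre : satisfaction ≠ []) :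
    maxSatisfactionOkButCanBeImproved satisfaction = maxSatisfactionOkButCanBeImproved_alt satisfaction := by
  set t := PySem.List.sorted satisfaction (fun x => x) false with hts
  simp only [maxSatisfactionOkButCanBeImproved, maxSatisfactionOkButCanBeImproved_alt, ← hts]
  have ht : t ≠ [] := by
    rw [hts, Ne, PySem.List.sorted_eq_nil_iff]; exact hpre
  have hlast : PySem.List.pyGet? t (-1) = some (t.getLast ht) := by
    rw [PySem.List.pyGet?_neg_one, List.getLast?_eq_some_getLast ht]
  simp only [hlast]
  set M := t.getLast ht with hM
  -- reversed list
  obtain ⟨v, rest, hr⟩ : ∃ v rest, t.reverse = v :: rest := by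
    rcases h : t.reverse with _ | ⟨v, rest⟩
    · exact absurd (by simpa using congrArg List.reverse h) ht
    · exact ⟨v, rest, rfl⟩
  have hv : v = M := by
    have h1 : t.reverse.head? = some v := by rw [hr]; rfl
    rw [List.head?_reverse, List.getLast?_eq_some_getLast ht] at h1
    exact (Option.some.inj h1).symm
  by_cases hM0 : M ≤ 0
  · rw [if_pos hM0, hr]
    simp only [pvB_loop]
    rw [if_pos (by omega)]
  · rw [if_neg hM0]
    -- positive sum
    rw [PySem.List.foldl_pyRange_zero_pyGetD' t 0 (fun acc x => if x > 0 then acc + x else acc) 0,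
      pvPosFold, zero_add]
    -- startIndex via pvSim
    have hn1 : (1 : Int) ≤ (t.length : Int) := by
      have : 0 < t.length := List.length_pos_iff.mpr ht
      omega
    rw [PySem.List.pyRange_neg_one_cons (by omega)]
    have hgetlast : PySem.List.pyGetD t ((t.length : Int) - 1) 0 = M := by
      have h1 : ((t.length : Int) - 1) = ((t.length - 1 : Nat) : Int) := by omega
      rw [h1, PySem.List.pyGetD_natCast, hM, List.getLast_eq_getElem,
        List.getD_eq_getElem?_getD, List.getElem?_eq_getElem (by omega)]
      rfl
    simp only [pvA_startLoop, hgetlast]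
    rw [if_neg (by omega)]
    have hpwr : t.reverse.Pairwise (· ≥ ·) := by
      rw [List.pairwise_reverse]
      have hsp := PySem.List.sorted_pairwise (xs := satisfaction) (key := fun x => x)
      rw [← hts] at hsp
      exact hsp.imp (fun h => h)
    have hvr : [v] ++ rest = t.reverse := by rw [hr]; rfl
    have hsim := pvSim (pvPos t) rest [v] 0
      (by rw [hvr]; exact hpwr)
      (by simp)
      (by rw [hvr]; simp [hr, hv]; omega)
      (by rw [hvr]
          have hpr : pvPos t.reverse = pvPos t := by
            simp [pvPos, List.filter_reverse]
          rw [hpr])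
      (by have hnv : ¬ (v < 0) := by omega
          simp [pvNeg, hnv])
    rw [hvr, List.reverse_reverse] at hsim
    have hlenr : (t.reverse.length : Int) = (t.length : Int) := by simp
    rw [hlenr] at hsim
    simp only [List.length_singleton, Nat.cast_one, List.sum_cons, List.sum_nil, add_zero] at hsim
    -- k = number of dishes kept
    set k : Nat := pvCnt rest v + 1 with hk
    have hkcnt : pvCnt t.reverse 0 = k := by
      rw [hr]
      simp only [pvCnt, zero_add]
      rw [if_neg (by omega)]
    have hkle : k ≤ t.length := by
      have := pvCnt_le_length t.reverse 0
      rw [hkcnt] at this; simpa using this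
    have hsi : pvA_startLoop t (PySem.List.pyRange ((t.length : Int) - 1 - 1) (-1) (-1))
        ((t.length : Int) - 1) 0 (pvPos t) = (t.length : Int) - (k : Int) := by
      rw [hsim, hk]; push_cast; ring
    rw [hsi]
    -- final weighted loop
    rw [pvAnsFold t k hkle]
    -- B's side
    rw [pvB_loop_val, hkcnt, zero_add]
    have hzero : ∀ m ∈ Finset.range k, (0 : Int) + pvPs t.reverse (m + 1) = pvPs t.reverse (m + 1) := by
      intro m _; ring
    rw [Finset.sum_congr rfl hzero, ← pvWeighted_eq_prefix]
    rw [← Finset.sum_range_reflect (fun p => t.reverse.getD p 0 * ((k : Int) - (p : Int))) k]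
    apply Finset.sum_congr rfl
    intro j hj
    simp only [Finset.mem_range] at hj
    rw [pvGetD_reverse t (k - 1 - j) (by omega)]
    have h1 : t.length - 1 - (k - 1 - j) = t.length - k + j := by omega
    rw [h1]
    congr 1
    have h2 : ((k - 1 - j : Nat) : Int) = (k : Int) - 1 - (j : Int) := by
      push_cast [show j ≤ k - 1 by omega, show 1 ≤ k by omega]; omega
    rw [h2]; ring

-- ===== VERDICT (by name: the statement is the Claim_ definition above) =====
theorem maxSatisfactionOkButCanBeImproved_spec : Claim_equal_maxSatisfactionOkButCanBeImproved := by
  intro satisfaction _ hpre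
  unfold Spec_maxSatisfactionOkButCanBeImproved
  exact pvMain satisfaction hpre
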